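-- pv_equiv track=rewrite | github.com/ryangrayson1/advent-of-code-2022 | day15.py | part1
-- ===== SOURCE A (Python) =====
-- def md(r1, c1, r2, c2):
--     return abs(r1 - r2) + abs(c1 - c2)
--
-- def get_cover(ranges):
--     ranges.sort()
--     merged = []
--     for l, r in ranges:
--         if merged and merged[-1][1] >= l:
--             merged[-1] = (merged[-1][0], max(merged[-1][1], r))
--         else:
--             merged.append((l, r))
--     res = 0
--     for l, r in merged:
--         res += r - l + 1
--     return res
--
-- def part1(sensors, beacons):
--     TGT = 2000000
--     ranges, beacons_at_tgt = [], set()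
--     for (sr, sc), (br, bc) in zip(sensors, beacons):
--         if br == TGT:
--             beacons_at_tgt.add(bc)
--         dist_from_tgt = abs(sr - TGT)
--         width_at_mid = 2 * md(sr, sc, br, bc) + 1
--         width_at_tgt = width_at_mid - 2 * dist_from_tgt
--         if width_at_tgt > 0:
--             ranges.append((sc - width_at_tgt // 2, sc + width_at_tgt // 2))
--
--     return get_cover(ranges) - len(beacons_at_tgt)
-- ===== SOURCE B (Python) =====
-- def part1(sensors, beacons):
--     TGT = 2000000
--     events, beacon_cols = [], set()
--     for (sr, sc), (br, bc) in zip(sensors, beacons):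
--         if br == TGT:
--             beacon_cols.add(bc)
--         w = abs(sr - br) + abs(sc - bc) - abs(sr - TGT)
--         if w >= 0:
--             events.append((sc - w, 1))
--             events.append((sc + w + 1, -1))
--     total, depth, start = 0, 0, 0
--     for x, d in sorted(events):
--         if depth == 0 and d == 1:
--             start = x
--         depth += d
--         if depth == 0:
--             total += x - start
--     return total - len(beacon_cols)
-- ===== Notes on version B (the rewrite author's own statement) =====
-- stated objective: alternative
-- what changed: B replaces A's sort-intervals-then-merge-overlapping-intervals-then-sum pipeline by a boundary-event sweep: each sensor contributes (+1 at left end, -1 past right end) events, and a single pass over the sorted events with a depth counter adds up the stretches where depth is positive.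
import Mathlib
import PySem

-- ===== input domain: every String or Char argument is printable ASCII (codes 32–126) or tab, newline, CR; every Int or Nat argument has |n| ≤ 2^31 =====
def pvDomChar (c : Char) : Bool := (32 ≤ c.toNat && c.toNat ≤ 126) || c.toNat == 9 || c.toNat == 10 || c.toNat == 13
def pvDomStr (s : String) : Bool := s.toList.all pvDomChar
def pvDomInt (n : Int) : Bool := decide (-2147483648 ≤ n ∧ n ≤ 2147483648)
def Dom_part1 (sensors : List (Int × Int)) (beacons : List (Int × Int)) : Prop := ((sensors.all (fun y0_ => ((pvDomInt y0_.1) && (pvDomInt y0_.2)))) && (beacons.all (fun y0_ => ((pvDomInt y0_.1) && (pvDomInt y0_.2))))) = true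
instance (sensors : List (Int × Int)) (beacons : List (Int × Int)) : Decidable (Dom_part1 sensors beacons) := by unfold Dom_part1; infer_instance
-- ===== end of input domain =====

-- B replaces A's sort-intervals/merge-overlaps/sum pipeline by a boundary-event sweep
-- (+1/-1 events with a depth counter over the sorted events): a different algorithm.

-- ===== PORT A =====
def md (r1 c1 r2 c2 : Int) : Int := |r1 - r2| + |c1 - c2|

-- the body of get_cover's first loop (merged[-1] update / append)
def mergeStep (m : List (Int × Int)) (p : Int × Int) : List (Int × Int) :=
  match m.getLast? with
  | some last => if last.2 ≥ p.1 then m.dropLast ++ [(last.1, max last.2 p.2)] else m ++ [p]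
  | none => m ++ [p]

def get_cover (ranges : List (Int × Int)) : Int :=
  let sortedR := PySem.List.sorted2 ranges Prod.fst Prod.snd
  let merged := sortedR.foldl mergeStep []
  merged.foldl (fun res p => res + (p.2 - p.1 + 1)) 0

-- the body of part1's loop over zip(sensors, beacons)
def stepA (st : List (Int × Int) × PySem.Set Int) (sb : (Int × Int) × (Int × Int)) :
    List (Int × Int) × PySem.Set Int :=
  let TGT : Int := 2000000
  let bset := if sb.2.1 = TGT then PySem.Set.add st.2 sb.2.2 else st.2
  let distFromTgt := |sb.1.1 - TGT|
  let widthAtMid := 2 * md sb.1.1 sb.1.2 sb.2.1 sb.2.2 + 1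
  let widthAtTgt := widthAtMid - 2 * distFromTgt
  let ranges := if widthAtTgt > 0 then
      st.1 ++ [(sb.1.2 - PySem.Int.floordiv widthAtTgt 2, sb.1.2 + PySem.Int.floordiv widthAtTgt 2)]
    else st.1
  (ranges, bset)

def part1 (sensors : List (Int × Int)) (beacons : List (Int × Int)) : Int :=
  let st := (sensors.zip beacons).foldl stepA ([], PySem.Set.empty)
  get_cover st.1 - (st.2.length : Int)

-- ===== PORT B =====
-- the body of B's loop over zip(sensors, beacons): collect ±1 boundary events
def stepB (st : List (Int × Int) × PySem.Set Int) (sb : (Int × Int) × (Int × Int)) :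
    List (Int × Int) × PySem.Set Int :=
  let TGT : Int := 2000000
  let bset := if sb.2.1 = TGT then PySem.Set.add st.2 sb.2.2 else st.2
  let w := |sb.1.1 - sb.2.1| + |sb.1.2 - sb.2.2| - |sb.1.1 - TGT|
  let evs := if w ≥ 0 then st.1 ++ [(sb.1.2 - w, 1), (sb.1.2 + w + 1, -1)] else st.1
  (evs, bset)

-- the body of B's sweep over the sorted events: state (total, depth, start)
def sweepStep (st : Int × Int × Int) (e : Int × Int) : Int × Int × Int :=
  let start := if st.2.1 = 0 ∧ e.2 = 1 then e.1 else st.2.2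
  let depth := st.2.1 + e.2
  let total := if depth = 0 then st.1 + (e.1 - start) else st.1
  (total, depth, start)

def part1_alt (sensors : List (Int × Int)) (beacons : List (Int × Int)) : Int :=
  let st := (sensors.zip beacons).foldl stepB ([], PySem.Set.empty)
  let r := (PySem.List.sorted2 st.1 Prod.fst Prod.snd).foldl sweepStep (0, 0, 0)
  r.1 - (st.2.length : Int)

-- ===== PRECONDITION & SPEC =====
def Spec_part1 (sensors : List (Int × Int)) (beacons : List (Int × Int)) (out : Int) : Prop := out = part1_alt sensors beacons
instance (sensors : List (Int × Int)) (beacons : List (Int × Int)) (out : Int) : Decidable (Spec_part1 sensors beacons out) := by unfold Spec_part1; infer_instance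

-- ===== CLAIM (what is proved, stated in full; the proofs are below) =====
def Claim_equal_part1 : Prop := ∀ (sensors : List (Int × Int)) (beacons : List (Int × Int)), Dom_part1 sensors beacons → Spec_part1 sensors beacons (part1 sensors beacons)

-- ===== LEMMAS AND PROOFS =====

-- the two boundary events of one interval, and of a whole interval list
def evOf (p : Int × Int) : List (Int × Int) := [(p.1, 1), (p.2 + 1, -1)]
def eventsOf (I : List (Int × Int)) : List (Int × Int) := I.flatMap evOf

-- A's merged-interval list summarised as (covered-so-far, highest end): intermediate between the ports
def clipStep (acc : Int × Option Int) (p : Int × Int) : Int × Option Int :=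
  match acc.2 with
  | none => (acc.1 + (p.2 - p.1 + 1), some p.2)
  | some h =>
    if p.1 > h then (acc.1 + (p.2 - p.1 + 1), some p.2)
    else if p.2 > h then (acc.1 + (p.2 - h), some p.2)
    else (acc.1, some h)

def sumLen (m : List (Int × Int)) : Int := m.foldl (fun res p => res + (p.2 - p.1 + 1)) 0

-- coupling between A's merge state and the clip state
def MergeRel (m : List (Int × Int)) (acc : Int × Option Int) : Prop :=
  acc.1 = sumLen m ∧ acc.2 = m.getLast?.map Prod.snd

-- Python sorts pairs lexicographically: sorted2 with fst/snd = sorted with the Lex key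
def sortE (xs : List (Int × Int)) : List (Int × Int) :=
  PySem.List.sorted xs (fun p => (toLex p : Lex (Int × Int)))

theorem sorted2_eq_sortE (xs : List (Int × Int)) :
    PySem.List.sorted2 xs Prod.fst Prod.snd = sortE xs := by
  show List.foldl _ [] xs = List.foldl _ [] xs
  congr 1
  funext acc x
  congr 1
  funext a b
  rw [Bool.eq_iff_iff]
  simp only [if_neg (by decide : ¬ (false = true)), Bool.or_eq_true, Bool.and_eq_true,
    Bool.not_eq_true', decide_eq_true_eq, decide_eq_false_iff_not, Prod.Lex.toLex_lt_toLex]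
  omega

theorem sortE_perm (xs : List (Int × Int)) : (sortE xs).Perm xs :=
  PySem.List.sorted_perm xs _ false

theorem sortE_pairwise (xs : List (Int × Int)) :
    (sortE xs).Pairwise (fun a b => (toLex a : Lex (Int × Int)) ≤ toLex b) :=
  PySem.List.sorted_pairwise xs _

theorem sortE_eq_of_perm_of_pairwise (L xs : List (Int × Int)) (hp : L.Perm xs)
    (hw : L.Pairwise (fun a b => (toLex a : Lex (Int × Int)) ≤ toLex b)) : sortE xs = L :=
  PySem.List.eq_of_perm_of_pairwise_le_of_injective (fun p => (toLex p : Lex (Int × Int)))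
    toLex.injective ((sortE_perm xs).trans hp.symm) (sortE_pairwise xs) hw

theorem mem_eventsOf {e : Int × Int} {T : List (Int × Int)} :
    e ∈ eventsOf T ↔ ∃ q ∈ T, e = (q.1, 1) ∨ e = (q.2 + 1, -1) := by
  simp [eventsOf, evOf, List.mem_flatMap]

theorem events_sum_zero (T : List (Int × Int)) : ((eventsOf T).map Prod.snd).sum = 0 := by
  induction T with
  | nil => rfl
  | cons q T ih =>
    simp only [eventsOf, List.flatMap_cons, List.map_append, List.sum_append] at ih ⊢
    simp [evOf, ih]

theorem events_filter_sum_nonneg (T : List (Int × Int)) (hlr : ∀ q ∈ T, q.1 ≤ q.2)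
    (c : Lex (Int × Int)) :
    0 ≤ (((eventsOf T).filter (fun e => decide ((toLex e : Lex (Int × Int)) < c))).map Prod.snd).sum := by
  induction T with
  | nil => simp [eventsOf]
  | cons q T ih =>
    have hq : q.1 ≤ q.2 := hlr q (List.mem_cons_self)
    have ih' := ih (fun r hr => hlr r (List.mem_cons_of_mem _ hr))
    simp only [eventsOf, List.flatMap_cons, List.filter_append, List.map_append,
      List.sum_append] at ih' ⊢
    have hmono : (toLex ((q.2 + 1, -1) : Int × Int) : Lex (Int × Int)) < c →
        (toLex ((q.1, 1) : Int × Int) : Lex (Int × Int)) < c := by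
      intro h2
      refine lt_trans ?_ h2
      rw [Prod.Lex.toLex_lt_toLex]
      left; omega
    by_cases h1 : (toLex ((q.1, 1) : Int × Int) : Lex (Int × Int)) < c
    · by_cases h2 : (toLex ((q.2 + 1, -1) : Int × Int) : Lex (Int × Int)) < c
      · simp [evOf, h1, h2]; omega
      · simp [evOf, h1, h2]; omega
    · have h2 : ¬ (toLex ((q.2 + 1, -1) : Int × Int) : Lex (Int × Int)) < c :=
        fun h => h1 (hmono h)
      simp [evOf, h1, h2]; omega

theorem sweepStep_open_pos (t d s l : Int) (hd : 0 < d) :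
    sweepStep (t, d, s) ((l, 1) : Int × Int) = (t, d + 1, s) := by
  simp only [sweepStep]
  split_ifs with h1 h2 h3 <;> simp_all <;> omega

theorem sweepStep_open_zero (t s l : Int) :
    sweepStep (t, 0, s) ((l, 1) : Int × Int) = (t, 1, l) := by
  simp only [sweepStep]
  split_ifs with h1 h2 h3 <;> simp_all

theorem sweepStep_close_mid (t d s : Int) (c : Int × Int) (hc : c.2 = -1) (hd : d + c.2 ≠ 0) :
    sweepStep (t, d, s) c = (t, d - 1, s) := by
  simp only [sweepStep, hc]
  split_ifs with h1 h2 h3 <;> simp_all <;> omega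

theorem sweepStep_close_end (t d s : Int) (c : Int × Int) (hc : c.2 = -1) (hd : d + c.2 = 0) :
    sweepStep (t, d, s) c = (t + (c.1 - s), 0, s) := by
  simp only [sweepStep, hc]
  split_ifs with h1 h2 h3 <;> simp_all

theorem sweep_depth (es : List (Int × Int)) (t d s : Int) :
    ((es.foldl sweepStep (t, d, s)).2.1) = d + (es.map Prod.snd).sum := by
  induction es generalizing t d s with
  | nil => simp
  | cons e es ih =>
    simp only [List.foldl_cons, List.map_cons, List.sum_cons]
    rw [show sweepStep (t, d, s) e =
      ((if d + e.2 = 0 then t + (e.1 - (if d = 0 ∧ e.2 = 1 then e.1 else s)) else t),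
        d + e.2, (if d = 0 ∧ e.2 = 1 then e.1 else s)) from rfl]
    rw [ih]
    ring

theorem sweep_opens_pos (m : Nat) (l t d s : Int) (hd : 0 < d) :
    (List.replicate m ((l, 1) : Int × Int)).foldl sweepStep (t, d, s) = (t, d + m, s) := by
  induction m generalizing d with
  | zero => simp
  | succ m ih =>
    rw [List.replicate_succ, List.foldl_cons, sweepStep_open_pos t d s l hd,
      ih (d + 1) (by omega)]
    simp only [Prod.mk.injEq, true_and, and_true]
    push_cast
    ring

theorem sweep_opens_zero (m : Nat) (l t s : Int) (hm : 0 < m) :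
    (List.replicate m ((l, 1) : Int × Int)).foldl sweepStep (t, 0, s) = (t, (m : Int), l) := by
  obtain ⟨k, rfl⟩ : ∃ k, m = k + 1 := ⟨m - 1, by omega⟩
  rw [List.replicate_succ, List.foldl_cons, sweepStep_open_zero t s l,
    sweep_opens_pos k l t 1 l (by omega)]
  simp only [Prod.mk.injEq, true_and, and_true]
  push_cast
  ring

theorem sweep_closes (cs : List (Int × Int)) (t s : Int) (hne : cs ≠ [])
    (hall : ∀ e ∈ cs, e.2 = -1) :
    cs.foldl sweepStep (t, (cs.length : Int), s) = (t + ((cs.getLast hne).1 - s), 0, s) := by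
  induction cs generalizing t with
  | nil => exact absurd rfl hne
  | cons c cs ih =>
    have hc : c.2 = -1 := hall c List.mem_cons_self
    cases cs with
    | nil =>
      simp only [List.foldl_cons, List.foldl_nil, List.getLast_singleton]
      rw [sweepStep_close_end t _ s c hc (by simp [hc])]
    | cons c' cs' =>
      have hg : (c :: c' :: cs').getLast hne = (c' :: cs').getLast (by simp) :=
        List.getLast_cons _
      rw [hg, List.foldl_cons,
        sweepStep_close_mid t _ s c hc (by simp [hc]; omega),
        show (((c :: c' :: cs').length : Int) - 1) = (((c' :: cs').length : Nat) : Int) by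
          simp,
        ih t (by simp) (fun e he => hall e (List.mem_cons_of_mem _ he))]

theorem pairwise_dropWhile_not {α : Type} (R : α → α → Prop) (p : α → Bool) (L : List α)
    (hpw : L.Pairwise R) (hdc : ∀ x ∈ L, ∀ y ∈ L, R x y → p y = true → p x = true) :
    ∀ e ∈ L.dropWhile p, p e = false := by
  induction L with
  | nil => simp
  | cons x t ih =>
    obtain ⟨hrel, htail⟩ := List.pairwise_cons.mp hpw
    cases hx : p x with
    | true =>
      rw [List.dropWhile_cons_of_pos hx]
      exact ih htail (fun a ha b hb hr hp' =>
        hdc a (List.mem_cons_of_mem _ ha) b (List.mem_cons_of_mem _ hb) hr hp')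
    | false =>
      rw [List.dropWhile_cons_of_neg (by simp [hx])]
      intro e he
      rcases List.mem_cons.mp he with rfl | he'
      · exact hx
      · by_contra hpe
        have hpe' : p e = true := by simpa using hpe
        have := hdc x List.mem_cons_self e (List.mem_cons_of_mem _ he') (hrel e he') hpe'
        rw [hx] at this
        exact Bool.false_ne_true this

theorem takeWhile_eq_filter_of_sorted {α : Type} (R : α → α → Prop) (p : α → Bool) (L : List α)
    (hpw : L.Pairwise R) (hdc : ∀ x ∈ L, ∀ y ∈ L, R x y → p y = true → p x = true) :
    L.takeWhile p = L.filter p := by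
  have h2 := pairwise_dropWhile_not R p L hpw hdc
  conv_rhs => rw [← List.takeWhile_append_dropWhile (p := p) (l := L)]
  rw [List.filter_append,
    List.filter_eq_self.mpr (fun a ha => List.mem_takeWhile_imp ha),
    List.filter_eq_nil_iff.mpr (fun a ha => by simp [h2 a ha]), List.append_nil]

theorem getLast_of_max (L : List (Int × Int))
    (hpw : L.Pairwise (fun a b => (toLex a : Lex (Int × Int)) ≤ toLex b))
    (e : Int × Int) (he : e ∈ L) (hmax : ∀ f ∈ L, (toLex f : Lex (Int × Int)) ≤ toLex e) :
    ∀ (h : L ≠ []), L.getLast h = e := by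
  induction L with
  | nil => intro h; exact absurd rfl h
  | cons x t ih =>
    intro h
    obtain ⟨hrel, htail⟩ := List.pairwise_cons.mp hpw
    cases t with
    | nil =>
      simp only [List.getLast_singleton]
      exact (List.mem_singleton.mp he).symm
    | cons y u =>
      rw [List.getLast_cons (by simp)]
      rcases List.mem_cons.mp he with rfl | he'
      · have hmem := List.getLast_mem (show y :: u ≠ [] by simp)
        have h1 : (toLex e : Lex (Int × Int)) ≤ toLex ((y :: u).getLast (by simp)) :=
          hrel _ hmem
        have h2 : (toLex ((y :: u).getLast (by simp)) : Lex (Int × Int)) ≤ toLex e :=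
          hmax _ (List.mem_cons_of_mem _ hmem)
        exact toLex.injective (le_antisymm h2 h1)
      · exact ih htail he' (fun f hf => hmax f (List.mem_cons_of_mem _ hf)) (by simp)

-- the hi component of the clip fold is the running max of right endpoints
def hiFold (o : Option Int) (L : List (Int × Int)) : Option Int :=
  L.foldl (fun o p => some (max (o.getD p.2) p.2)) o

theorem clip_snd (L : List (Int × Int)) (acc : Int × Option Int) (hlr : ∀ p ∈ L, p.1 ≤ p.2) :
    (L.foldl clipStep acc).2 = hiFold acc.2 L := by
  induction L generalizing acc with
  | nil => rfl
  | cons p L ih =>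
    have hp : p.1 ≤ p.2 := hlr p List.mem_cons_self
    have hl' : ∀ q ∈ L, q.1 ≤ q.2 := fun q hq => hlr q (List.mem_cons_of_mem _ hq)
    rw [List.foldl_cons, ih _ hl']
    show hiFold (clipStep acc p).2 L = hiFold (some (max (acc.2.getD p.2) p.2)) L
    congr 1
    cases hacc : acc.2 with
    | none => simp [clipStep, hacc]
    | some h =>
      simp only [clipStep, hacc, Option.getD_some]
      split_ifs with h1 h2
      · simp; omega
      · simp; omega
      · simp; omega

theorem hiFold_some (L : List (Int × Int)) (h : Int) :
    ∃ h', hiFold (some h) L = some h' ∧ h ≤ h' ∧ (h' = h ∨ ∃ q ∈ L, q.2 = h') ∧ ∀ q ∈ L, q.2 ≤ h' := by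
  induction L generalizing h with
  | nil => exact ⟨h, rfl, le_refl h, Or.inl rfl, by simp⟩
  | cons p L ih =>
    obtain ⟨h', heq, hle, hor, hub⟩ := ih (max h p.2)
    refine ⟨h', ?_, le_trans (le_max_left _ _) hle, ?_, ?_⟩
    · simpa [hiFold] using heq
    · rcases hor with rfl | ⟨q, hq, hq2⟩
      · rcases max_cases h p.2 with ⟨hm, _⟩ | ⟨hm, _⟩
        · exact Or.inl hm
        · exact Or.inr ⟨p, List.mem_cons_self, hm.symm⟩
      · exact Or.inr ⟨q, List.mem_cons_of_mem _ hq, hq2⟩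
    · intro q hq
      rcases List.mem_cons.mp hq with rfl | hq'
      · exact le_trans (le_max_right _ _) hle
      · exact hub q hq'

theorem hiFold_none (L : List (Int × Int)) (hne : L ≠ []) :
    ∃ h', hiFold none L = some h' ∧ (∃ q ∈ L, q.2 = h') ∧ ∀ q ∈ L, q.2 ≤ h' := by
  cases L with
  | nil => exact absurd rfl hne
  | cons p L =>
    obtain ⟨h', heq, hle, hor, hub⟩ := hiFold_some L p.2
    refine ⟨h', by simpa [hiFold] using heq, ?_, ?_⟩
    · rcases hor with rfl | ⟨q, hq, hq2⟩
      · exact ⟨p, List.mem_cons_self, rfl⟩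
      · exact ⟨q, List.mem_cons_of_mem _ hq, hq2⟩
    · intro q hq
      rcases List.mem_cons.mp hq with rfl | hq'
      · exact hle
      · exact hub q hq'

theorem getLast_eq_of_getLast? {α : Type} (L : List α) (h : L ≠ []) (x : α)
    (hx : L.getLast? = some x) : L.getLast h = x := by
  rw [List.getLast?_eq_some_getLast h] at hx
  exact Option.some.inj hx

-- CORE: the event sweep over the sorted events equals the clip fold over the sorted intervals
theorem core (S : List (Int × Int))
    (hsorted : S.Pairwise (fun a b => (toLex a : Lex (Int × Int)) ≤ toLex b))
    (hlr : ∀ q ∈ S, q.1 ≤ q.2) :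
    ((sortE (eventsOf S)).foldl sweepStep (0, 0, 0)).1 = (S.foldl clipStep (0, none)).1 := by
  induction S using List.reverseRecOn with
  | nil => rfl
  | append_singleton T p ih0 =>
    rw [List.pairwise_append] at hsorted
    obtain ⟨hTpw, _, hcross⟩ := hsorted
    have hTle : ∀ q ∈ T, (toLex q : Lex (Int × Int)) ≤ toLex p :=
      fun q hq => hcross q hq p (List.mem_singleton_self p)
    have hlrT : ∀ q ∈ T, q.1 ≤ q.2 := fun q hq => hlr q (List.mem_append_left _ hq)
    have hp12 : p.1 ≤ p.2 := hlr p (List.mem_append_right _ (List.mem_singleton_self p))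
    have ih := ih0 hTpw hlrT
    set E : List (Int × Int) := sortE (eventsOf T) with hE
    have hEperm : E.Perm (eventsOf T) := sortE_perm _
    have hEpw : E.Pairwise (fun x y => (toLex x : Lex (Int × Int)) ≤ toLex y) := sortE_pairwise _
    set pb : (Int × Int) → Bool :=
      fun e => decide ((toLex e : Lex (Int × Int)) < toLex ((p.1, 1) : Int × Int)) with hpb
    set E₁ : List (Int × Int) := E.takeWhile pb with hE1
    set E₂ : List (Int × Int) := E.dropWhile pb with hE2
    have hsplit : E₁ ++ E₂ = E := List.takeWhile_append_dropWhile
    have hE1lt : ∀ e ∈ E₁, (toLex e : Lex (Int × Int)) < toLex ((p.1, 1) : Int × Int) := by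
      intro e he
      have := List.mem_takeWhile_imp he
      simpa [hpb] using this
    have hdc : ∀ x ∈ E, ∀ y ∈ E,
        ((toLex x : Lex (Int × Int)) ≤ toLex y) → pb y = true → pb x = true := by
      intro x _ y _ hxy hy
      simp only [hpb, decide_eq_true_eq] at hy ⊢
      exact lt_of_le_of_lt hxy hy
    have hE2ge : ∀ e ∈ E₂, (toLex ((p.1, 1) : Int × Int) : Lex (Int × Int)) ≤ toLex e := by
      intro e he
      have := pairwise_dropWhile_not _ pb E hEpw hdc e he
      simp only [hpb, decide_eq_false_iff_not] at this
      exact not_lt.mp this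
    have hshape : ∀ e ∈ E₂, e = ((p.1, 1) : Int × Int) ∨ (e.2 = -1 ∧ p.1 < e.1) := by
      intro e he
      have heE : e ∈ E := (List.dropWhile_sublist pb).subset he
      obtain ⟨q, hq, hor⟩ := mem_eventsOf.mp (hEperm.mem_iff.mp heE)
      have hge := hE2ge e he
      have hqp := hTle q hq
      rw [Prod.Lex.toLex_le_toLex] at hqp
      rcases hor with rfl | rfl
      · left
        rw [Prod.Lex.toLex_le_toLex] at hge
        dsimp only at hge
        have : q.1 = p.1 := by omega
        rw [this]
      · right
        rw [Prod.Lex.toLex_le_toLex] at hge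
        dsimp only at hge
        exact ⟨rfl, by omega⟩
    set pa : (Int × Int) → Bool := fun e => decide (e = ((p.1, 1) : Int × Int)) with hpa
    set M : List (Int × Int) := E₂.takeWhile pa with hM
    set C : List (Int × Int) := E₂.dropWhile pa with hC
    have hsplit2 : M ++ C = E₂ := List.takeWhile_append_dropWhile
    have hE2pw : E₂.Pairwise (fun x y => (toLex x : Lex (Int × Int)) ≤ toLex y) :=
      List.Pairwise.sublist (List.dropWhile_sublist pb) hEpw
    have hMall : ∀ e ∈ M, e = ((p.1, 1) : Int × Int) := by
      intro e he
      have := List.mem_takeWhile_imp he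
      simpa [hpa] using this
    have hdc2 : ∀ x ∈ E₂, ∀ y ∈ E₂,
        ((toLex x : Lex (Int × Int)) ≤ toLex y) → pa y = true → pa x = true := by
      intro x hx y _ hxy hy
      have hya : y = ((p.1, 1) : Int × Int) := by simpa [hpa] using hy
      subst hya
      have h1 := hE2ge x hx
      have hxeq : (toLex x : Lex (Int × Int)) = toLex ((p.1, 1) : Int × Int) :=
        le_antisymm hxy h1
      simp [hpa, toLex.injective hxeq]
    have hCclose : ∀ e ∈ C, e.2 = -1 ∧ p.1 < e.1 := by
      intro e he
      have he2 : e ∈ E₂ := (List.dropWhile_sublist pa).subset he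
      rcases hshape e he2 with heq | h
      · exfalso
        have hfalse := pairwise_dropWhile_not _ pa E₂ hE2pw hdc2 e he
        rw [heq] at hfalse
        simp [hpa] at hfalse
      · exact h
    -- depth after E₁, and counting facts
    set w₁ : Int × Int × Int := E₁.foldl sweepStep (0, 0, 0) with hw1
    set d₀ : Int := (E₁.map Prod.snd).sum with hd0def
    have hweta : w₁ = (w₁.1, w₁.2.1, w₁.2.2) := rfl
    have hd₀ : w₁.2.1 = d₀ := by
      rw [hw1, sweep_depth, hd0def]; ring
    have hE1filter : E₁ = E.filter pb :=
      takeWhile_eq_filter_of_sorted _ pb E hEpw hdc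
    have hd₀nn : 0 ≤ d₀ := by
      rw [hd0def, hE1filter, List.Perm.sum_eq ((hEperm.filter pb).map Prod.snd), hpb]
      exact events_filter_sum_nonneg T hlrT (toLex ((p.1, 1) : Int × Int))
    have hsumE : (E.map Prod.snd).sum = 0 := by
      rw [List.Perm.sum_eq (hEperm.map Prod.snd)]
      exact events_sum_zero T
    have hEMC : E = E₁ ++ (M ++ C) := by rw [hsplit2, hsplit]
    have hMsum : (M.map Prod.snd).sum = (M.length : Int) := by
      rw [List.eq_replicate_of_mem hMall]
      simp [List.map_replicate, List.sum_replicate]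
    have hCsum : (C.map Prod.snd).sum = -(C.length : Int) := by
      have hall : ∀ b ∈ C.map Prod.snd, b = (-1 : Int) := by
        intro b hb
        obtain ⟨e, he, rfl⟩ := List.mem_map.mp hb
        exact (hCclose e he).1
      rw [List.eq_replicate_of_mem hall]
      simp [List.sum_replicate]
    have hClen : (C.length : Int) = d₀ + (M.length : Int) := by
      have hz := hsumE
      rw [hEMC] at hz
      simp only [List.map_append, List.sum_append] at hz
      rw [← hd0def] at hz
      omega
    have hevTp : eventsOf (T ++ [p]) = eventsOf T ++ [((p.1, 1) : Int × Int), (p.2 + 1, -1)] := by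
      simp [eventsOf, List.flatMap_append, evOf]
    rw [List.foldl_append]
    by_cases hCnil : C = []
    · -- no event of T lies at or beyond (p.1, 1): the new interval starts past everything
      have hlen0 : M.length = 0 ∧ d₀ = 0 := by
        rw [hCnil] at hClen
        simp at hClen
        omega
      have hMnil : M = [] := List.length_eq_zero_iff.mp hlen0.1
      have hEeq : E = E₁ := by
        rw [hEMC, hMnil, hCnil]
        simp
      have hNpw : (E ++ [((p.1, 1) : Int × Int), (p.2 + 1, -1)]).Pairwise
          (fun x y => (toLex x : Lex (Int × Int)) ≤ toLex y) := by
        rw [List.pairwise_append]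
        refine ⟨hEpw, ?_, ?_⟩
        · refine List.pairwise_cons.mpr ⟨?_, by simp⟩
          intro y hy
          rcases List.mem_singleton.mp hy with rfl
          rw [Prod.Lex.toLex_le_toLex]
          dsimp only
          omega
        · intro x hx y hy
          have hxa := hE1lt x (hEeq ▸ hx)
          rcases List.mem_cons.mp hy with rfl | hy'
          · exact le_of_lt hxa
          · rcases List.mem_singleton.mp hy' with rfl
            refine le_trans (le_of_lt hxa) ?_
            rw [Prod.Lex.toLex_le_toLex]
            dsimp only
            omega
      have hNperm : (E ++ [((p.1, 1) : Int × Int), (p.2 + 1, -1)]).Perm (eventsOf (T ++ [p])) := by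
        rw [hevTp]
        exact hEperm.append_right _
      rw [sortE_eq_of_perm_of_pairwise _ _ hNperm hNpw]
      rw [List.foldl_append, hEeq, ← hw1]
      have hd0w : w₁.2.1 = 0 := by rw [hd₀]; exact hlen0.2
      have hstep2 : (([((p.1, 1) : Int × Int), (p.2 + 1, -1)]).foldl sweepStep w₁)
          = (w₁.1 + (p.2 + 1 - p.1), 0, p.1) := by
        rw [hweta, hd0w, List.foldl_cons, sweepStep_open_zero w₁.1 w₁.2.2 p.1, List.foldl_cons,
          sweepStep_close_end w₁.1 1 p.1 ((p.2 + 1, -1) : Int × Int) rfl (by norm_num),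
          List.foldl_nil]
      rw [hstep2]
      have hw11 : w₁.1 = (T.foldl clipStep (0, none)).1 := by
        rw [hw1, ← hEeq]; exact ih
      rw [List.foldl_cons, List.foldl_nil]
      by_cases hT : T = []
      · subst hT
        simp only [List.foldl_nil] at hw11 ⊢
        simp only [clipStep]
        omega
      · obtain ⟨h, hhiEq, ⟨q₀, hq₀, hq₀2⟩, hub⟩ := hiFold_none T hT
        have hcT2 : (T.foldl clipStep (0, none)).2 = some h := by
          rw [clip_snd T ((0 : Int), (none : Option Int)) hlrT]; exact hhiEq
        have hgHE : ((q₀.2 + 1, -1) : Int × Int) ∈ E :=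
          hEperm.mem_iff.mpr (mem_eventsOf.mpr ⟨q₀, hq₀, Or.inr rfl⟩)
        have hlt : h < p.1 := by
          have hx := hE1lt _ (hEeq ▸ hgHE)
          rw [Prod.Lex.toLex_lt_toLex] at hx
          dsimp only at hx
          omega
        have hclip : clipStep (T.foldl clipStep (0, none)) p
            = ((T.foldl clipStep (0, none)).1 + (p.2 - p.1 + 1), some p.2) := by
          rw [show (T.foldl clipStep (0, none))
              = ((T.foldl clipStep (0, none)).1, (T.foldl clipStep (0, none)).2) from rfl, hcT2]
          simp only [clipStep]
          rw [if_pos (by omega : p.1 > h)]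
        rw [hclip, hw11]
        dsimp only
        ring
    · -- some event of T lies at or beyond (p.1, 1)
      have hTne : T ≠ [] := by
        intro h0
        apply hCnil
        have hEnil : E = [] := by
          rw [h0] at hEperm
          exact List.Perm.eq_nil (by simpa [eventsOf] using hEperm)
        rw [hC, hE2, hEnil]
        rfl
      have hCne : C ≠ [] := hCnil
      obtain ⟨h, hhiEq, ⟨q₀, hq₀, hq₀2⟩, hub⟩ := hiFold_none T hTne
      have hcT2 : (T.foldl clipStep (0, none)).2 = some h := by
        rw [clip_snd T ((0 : Int), (none : Option Int)) hlrT]; exact hhiEq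
      have hgHmem : ((h + 1, -1) : Int × Int) ∈ E :=
        hEperm.mem_iff.mpr (mem_eventsOf.mpr ⟨q₀, hq₀, Or.inr (by rw [hq₀2])⟩)
      have hgHmax : ∀ f ∈ E, (toLex f : Lex (Int × Int)) ≤ toLex ((h + 1, -1) : Int × Int) := by
        intro f hf
        obtain ⟨q, hq, hor⟩ := mem_eventsOf.mp (hEperm.mem_iff.mp hf)
        have hq12 := hlrT q hq
        have hqh := hub q hq
        rcases hor with rfl | rfl
        · rw [Prod.Lex.toLex_le_toLex]; dsimp only; omega
        · rw [Prod.Lex.toLex_le_toLex]; dsimp only; omega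
      have hCpw : C.Pairwise (fun x y => (toLex x : Lex (Int × Int)) ≤ toLex y) :=
        List.Pairwise.sublist (List.dropWhile_sublist pa) hE2pw
      have hCsubE : ∀ e ∈ C, e ∈ E := fun e he =>
        (List.dropWhile_sublist pb).subset ((List.dropWhile_sublist pa).subset he)
      have hlh : p.1 ≤ h := by
        have h1 := hCclose _ (List.head_mem hCne)
        have h2 := hgHmax _ (hCsubE _ (List.head_mem hCne))
        rw [Prod.Lex.toLex_le_toLex] at h2
        dsimp only at h2
        omega
      have hgHinC : ((h + 1, -1) : Int × Int) ∈ C := by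
        have hmem := hgHmem
        rw [hEMC] at hmem
        rcases List.mem_append.mp hmem with h1 | h1
        · exfalso
          have hx := hE1lt _ h1
          rw [Prod.Lex.toLex_lt_toLex] at hx
          dsimp only at hx
          omega
        · rcases List.mem_append.mp h1 with h2 | h2
          · exfalso
            have hx := hMall _ h2
            simp [Prod.ext_iff] at hx
          · exact h2
      have hlastC : C.getLast hCne = ((h + 1, -1) : Int × Int) :=
        getLast_of_max C hCpw _ hgHinC (fun f hf => hgHmax f (hCsubE f hf)) hCne
      -- split C at the new close event
      set pc : (Int × Int) → Bool :=
        fun e => decide ((toLex e : Lex (Int × Int)) ≤ toLex ((p.2 + 1, -1) : Int × Int)) with hpc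
      set C₁ : List (Int × Int) := C.takeWhile pc with hC1
      set C₂ : List (Int × Int) := C.dropWhile pc with hC2'
      have hsplit3 : C₁ ++ C₂ = C := List.takeWhile_append_dropWhile
      have hC1le : ∀ e ∈ C₁, (toLex e : Lex (Int × Int)) ≤ toLex ((p.2 + 1, -1) : Int × Int) := by
        intro e he
        have := List.mem_takeWhile_imp he
        simpa [hpc] using this
      have hdc3 : ∀ x ∈ C, ∀ y ∈ C,
          ((toLex x : Lex (Int × Int)) ≤ toLex y) → pc y = true → pc x = true := by
        intro x _ y _ hxy hy
        simp only [hpc, decide_eq_true_eq] at hy ⊢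
        exact le_trans hxy hy
      have hC2gt : ∀ e ∈ C₂, (toLex ((p.2 + 1, -1) : Int × Int) : Lex (Int × Int)) < toLex e := by
        intro e he
        have := pairwise_dropWhile_not _ pc C hCpw hdc3 e he
        simp only [hpc, decide_eq_false_iff_not] at this
        exact not_le.mp this
      -- the new sorted event list
      have hsubE₂ : ∀ e ∈ M ++ (C₁ ++ ((p.2 + 1, -1) : Int × Int) :: C₂),
          e = ((p.2 + 1, -1) : Int × Int) ∨ e ∈ E₂ := by
        intro e he
        rcases List.mem_append.mp he with h1 | h1
        · exact Or.inr (hsplit2 ▸ List.mem_append_left _ h1)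
        · rcases List.mem_append.mp h1 with h2 | h2
          · exact Or.inr (hsplit2 ▸ List.mem_append_right _
              (hsplit3 ▸ List.mem_append_left _ h2))
          · rcases List.mem_cons.mp h2 with rfl | h3
            · exact Or.inl rfl
            · exact Or.inr (hsplit2 ▸ List.mem_append_right _
                (hsplit3 ▸ List.mem_append_right _ h3))
      have haLeAll : ∀ y ∈ M ++ (C₁ ++ ((p.2 + 1, -1) : Int × Int) :: C₂),
          (toLex ((p.1, 1) : Int × Int) : Lex (Int × Int)) ≤ toLex y := by
        intro y hy
        rcases hsubE₂ y hy with rfl | h2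
        · rw [Prod.Lex.toLex_le_toLex]; dsimp only; omega
        · exact hE2ge y h2
      have hNpw : (E₁ ++ ((p.1, 1) : Int × Int) :: (M ++ (C₁ ++ ((p.2 + 1, -1) : Int × Int) :: C₂))).Pairwise
          (fun x y => (toLex x : Lex (Int × Int)) ≤ toLex y) := by
        rw [List.pairwise_append]
        refine ⟨List.Pairwise.sublist (List.takeWhile_sublist pb) hEpw, ?_, ?_⟩
        · rw [List.pairwise_cons]
          refine ⟨haLeAll, ?_⟩
          rw [List.pairwise_append]
          refine ⟨List.Pairwise.sublist (List.takeWhile_sublist pa) hE2pw, ?_, ?_⟩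
          · rw [List.pairwise_append]
            refine ⟨List.Pairwise.sublist (List.takeWhile_sublist pc) hCpw, ?_, ?_⟩
            · rw [List.pairwise_cons]
              exact ⟨fun y hy => le_of_lt (hC2gt y hy),
                List.Pairwise.sublist (List.dropWhile_sublist pc) hCpw⟩
            · intro x hx y hy
              rcases List.mem_cons.mp hy with rfl | hy'
              · exact hC1le x hx
              · exact le_trans (hC1le x hx) (le_of_lt (hC2gt y hy'))
          · intro x hx y hy
            rw [hMall x hx]
            exact haLeAll y (List.mem_append_right _ hy)
        · intro x hx y hy
          have hxa := hE1lt x hx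
          rcases List.mem_cons.mp hy with rfl | hy'
          · exact le_of_lt hxa
          · exact le_trans (le_of_lt hxa) (haLeAll y hy')
      have hNperm : (E₁ ++ ((p.1, 1) : Int × Int) :: (M ++ (C₁ ++ ((p.2 + 1, -1) : Int × Int) :: C₂))).Perm
          (eventsOf (T ++ [p])) := by
        rw [hevTp]
        have h1 : (E₁ ++ ((p.1, 1) : Int × Int) :: (M ++ (C₁ ++ ((p.2 + 1, -1) : Int × Int) :: C₂))).Perm
            (E ++ [((p.1, 1) : Int × Int), (p.2 + 1, -1)]) := by
          rw [hEMC, ← hsplit3, List.perm_iff_count]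
          intro x
          simp only [List.count_append, List.count_cons, List.count_nil, beq_iff_eq]
          omega
        exact h1.trans (hEperm.append_right _)
      rw [sortE_eq_of_perm_of_pairwise _ _ hNperm hNpw]
      -- evaluate the sweep over the new list
      have hallclose : ∀ e ∈ C₁ ++ ((p.2 + 1, -1) : Int × Int) :: C₂, e.2 = -1 := by
        intro e he
        rcases List.mem_append.mp he with h1 | h1
        · exact (hCclose e ((List.takeWhile_sublist pc).subset h1)).1
        · rcases List.mem_cons.mp h1 with rfl | h2
          · rfl
          · exact (hCclose e ((List.dropWhile_sublist pc).subset h2)).1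
      rw [show E₁ ++ ((p.1, 1) : Int × Int) :: (M ++ (C₁ ++ ((p.2 + 1, -1) : Int × Int) :: C₂))
          = E₁ ++ ((((p.1, 1) : Int × Int) :: M) ++ (C₁ ++ ((p.2 + 1, -1) : Int × Int) :: C₂)) by simp]
      rw [List.foldl_append, List.foldl_append, ← hw1]
      have hopen_new : ((((p.1, 1) : Int × Int) :: M).foldl sweepStep w₁)
          = (w₁.1, d₀ + ((M.length : Int) + 1), if d₀ = 0 then p.1 else w₁.2.2) := by
        rw [show (((p.1, 1) : Int × Int) :: M) = List.replicate (M.length + 1) ((p.1, 1) : Int × Int) by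
          rw [List.replicate_succ]; congr 1; exact List.eq_replicate_of_mem hMall]
        rw [hweta, hd₀]
        by_cases hd0 : d₀ = 0
        · rw [hd0, if_pos rfl, sweep_opens_zero (M.length + 1) p.1 w₁.1 w₁.2.2 (by omega)]
          simp only [Prod.mk.injEq, List.length_replicate, true_and, and_true]
          push_cast
          omega
        · rw [if_neg hd0,
            sweep_opens_pos (M.length + 1) p.1 w₁.1 d₀ w₁.2.2 (lt_of_le_of_ne hd₀nn (Ne.symm hd0))]
          simp only [Prod.mk.injEq, List.length_replicate, true_and, and_true]
          push_cast
          omega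
      rw [hopen_new]
      have hC12len : (C₁.length : Int) + (C₂.length : Int) = (C.length : Int) := by
        rw [← hsplit3]
        push_cast [List.length_append]
        ring
      have hcsne : C₁ ++ ((p.2 + 1, -1) : Int × Int) :: C₂ ≠ [] := by simp
      have hlen_cs : d₀ + ((M.length : Int) + 1)
          = (((C₁ ++ ((p.2 + 1, -1) : Int × Int) :: C₂).length : Nat) : Int) := by
        push_cast [List.length_append, List.length_cons]
        omega
      rw [hlen_cs,
        sweep_closes (C₁ ++ ((p.2 + 1, -1) : Int × Int) :: C₂) w₁.1 _ hcsne hallclose]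
      -- the old sweep total, via ih
      have hold : (E.foldl sweepStep (0, 0, 0)).1
          = w₁.1 + ((h + 1) - (if d₀ = 0 then p.1 else w₁.2.2)) := by
        rw [hEMC, List.foldl_append, List.foldl_append, ← hw1]
        have hopen_old : (M.foldl sweepStep w₁)
            = (w₁.1, d₀ + (M.length : Int), if d₀ = 0 then p.1 else w₁.2.2) := by
          rw [show M = List.replicate M.length ((p.1, 1) : Int × Int) from
            List.eq_replicate_of_mem hMall, hweta, hd₀]
          by_cases hd0 : d₀ = 0
          · have hm0 : M.length ≠ 0 := by
              intro hm
              apply hCnil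
              rw [hd0, hm] at hClen
              have hcl : C.length = 0 := by exact_mod_cast hClen
              exact List.length_eq_zero_iff.mp hcl
            rw [hd0, if_pos rfl, sweep_opens_zero M.length p.1 w₁.1 w₁.2.2 (by omega)]
            simp only [Prod.mk.injEq, List.length_replicate, true_and, and_true]
            omega
          · rw [if_neg hd0,
              sweep_opens_pos M.length p.1 w₁.1 d₀ w₁.2.2 (lt_of_le_of_ne hd₀nn (Ne.symm hd0))]
            simp [List.length_replicate]
        rw [hopen_old, show d₀ + (M.length : Int) = ((C.length : Nat) : Int) from hClen.symm,
          sweep_closes C w₁.1 _ hCne (fun e he => (hCclose e he).1), hlastC]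
      have hctot : (T.foldl clipStep (0, none)).1
          = w₁.1 + ((h + 1) - (if d₀ = 0 then p.1 else w₁.2.2)) := by
        rw [← ih]
        exact hold
      -- the clip step on the new interval
      have hclip : (clipStep (T.foldl clipStep (0, none)) p).1
          = (T.foldl clipStep (0, none)).1 + (if p.2 > h then p.2 - h else 0) := by
        rw [show (T.foldl clipStep (0, none))
            = ((T.foldl clipStep (0, none)).1, (T.foldl clipStep (0, none)).2) from rfl, hcT2]
        simp only [clipStep]
        rw [if_neg (by omega : ¬ p.1 > h)]
        split_ifs with h2 <;> simp
      rw [List.foldl_cons, List.foldl_nil, hclip, hctot]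
      -- compare the last close event of the two sweeps
      by_cases hC2nil : C₂ = []
      · -- the new interval reaches at least as far as everything before: last close is (p.2+1, -1)
        have hlast_cs : (C₁ ++ ((p.2 + 1, -1) : Int × Int) :: C₂).getLast hcsne
            = ((p.2 + 1, -1) : Int × Int) := by
          refine getLast_eq_of_getLast? _ hcsne _ ?_
          rw [hC2nil, List.getLast?_concat]
        have hhp2 : h ≤ p.2 := by
          have hgC1 : ((h + 1, -1) : Int × Int) ∈ C₁ := by
            rw [← hsplit3, hC2nil, List.append_nil] at hgHinC
            exact hgHinC
          have := hC1le _ hgC1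
          rw [Prod.Lex.toLex_le_toLex] at this
          dsimp only at this
          omega
        rw [hlast_cs]
        dsimp only
        split_ifs with h2 <;> omega
      · -- an older interval reaches beyond the new one: last close is (h+1, -1)
        have hCq : C.getLast? = some ((h + 1, -1) : Int × Int) := by
          rw [List.getLast?_eq_some_getLast hCne, hlastC]
        have hC2q : C₂.getLast? = some ((h + 1, -1) : Int × Int) := by
          rw [← hCq, ← hsplit3, List.getLast?_append_of_ne_nil _ hC2nil]
        have hgC2 : (C₂.getLast hC2nil) = ((h + 1, -1) : Int × Int) :=
          getLast_eq_of_getLast? _ hC2nil _ hC2q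
        have hlast_cs : (C₁ ++ ((p.2 + 1, -1) : Int × Int) :: C₂).getLast hcsne
            = ((h + 1, -1) : Int × Int) := by
          refine getLast_eq_of_getLast? _ hcsne _ ?_
          rw [List.getLast?_append_of_ne_nil _ (by simp),
            show ((p.2 + 1, -1) : Int × Int) :: C₂ = [((p.2 + 1, -1) : Int × Int)] ++ C₂ from rfl,
            List.getLast?_append_of_ne_nil _ hC2nil]
          exact hC2q
        have hph : p.2 < h := by
          have hmm := hC2gt _ (hgC2 ▸ List.getLast_mem hC2nil)
          rw [Prod.Lex.toLex_lt_toLex] at hmm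
          dsimp only at hmm
          omega
        rw [hlast_cs]
        dsimp only
        rw [if_neg (by omega : ¬ p.2 > h)]
        ring

-- A's merge list and the clip state stay coupled
theorem sumLen_append_singleton (m : List (Int × Int)) (p : Int × Int) :
    sumLen (m ++ [p]) = sumLen m + (p.2 - p.1 + 1) := by
  unfold sumLen
  rw [List.foldl_append]
  rfl

theorem rel_step (m : List (Int × Int)) (acc : Int × Option Int) (p : Int × Int)
    (h : MergeRel m acc) : MergeRel (mergeStep m p) (clipStep acc p) := by
  obtain ⟨t, hi⟩ := acc
  obtain ⟨h1, h2⟩ := h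
  unfold mergeStep clipStep
  cases hm : m.getLast? with
  | none =>
    have hnil : m = [] := List.getLast?_eq_none_iff.mp hm
    subst hnil
    simp only [hm] at h2 ⊢
    subst h2
    simp only [Option.map_none] at h1 ⊢
    constructor
    · simp only [List.nil_append, sumLen, List.foldl] at h1 ⊢
      omega
    · simp
  | some last =>
    rw [hm] at h2
    simp only [Option.map_some] at h2
    subst h2
    obtain ⟨ys, rfl⟩ := List.getLast?_eq_some_iff.mp hm
    have hdrop : (ys ++ [last]).dropLast = ys := by simp
    dsimp only
    dsimp only at h1
    by_cases hgt : p.1 > last.2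
    · rw [if_pos hgt, if_neg (by omega)]
      refine ⟨?_, ?_⟩
      · dsimp only
        rw [sumLen_append_singleton]
        omega
      · simp
    · rw [if_neg hgt, if_pos (by omega)]
      by_cases hr : p.2 > last.2
      · rw [if_pos hr]
        refine ⟨?_, ?_⟩
        · dsimp only
          rw [sumLen_append_singleton] at h1
          rw [hdrop, sumLen_append_singleton]
          dsimp only
          have hmax : max last.2 p.2 = p.2 := by omega
          rw [hmax]
          omega
        · dsimp only
          rw [List.getLast?_concat]
          have hmax : max last.2 p.2 = p.2 := by omega
          simp [hmax]
      · rw [if_neg hr]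
        refine ⟨?_, ?_⟩
        · dsimp only
          rw [sumLen_append_singleton] at h1
          rw [hdrop, sumLen_append_singleton]
          dsimp only
          have hmax : max last.2 p.2 = last.2 := by omega
          rw [hmax]
          omega
        · dsimp only
          rw [List.getLast?_concat]
          have hmax : max last.2 p.2 = last.2 := by omega
          simp [hmax]

theorem rel_fold (s : List (Int × Int)) :
    ∀ (m : List (Int × Int)) (acc : Int × Option Int), MergeRel m acc →
      MergeRel (s.foldl mergeStep m) (s.foldl clipStep acc) := by
  intro m acc h
  induction s generalizing m acc with
  | nil => exact h
  | cons p t ih => exact ih _ _ (rel_step m acc p h)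

-- the two accumulation loops stay coupled
theorem steps_couple (zs : List ((Int × Int) × (Int × Int))) (I : List (Int × Int)) (bs : PySem.Set Int) :
    (zs.foldl stepB (eventsOf I, bs)).1 = eventsOf (zs.foldl stepA (I, bs)).1
    ∧ (zs.foldl stepB (eventsOf I, bs)).2 = (zs.foldl stepA (I, bs)).2
    ∧ ((∀ p ∈ I, p.1 ≤ p.2) → ∀ p ∈ (zs.foldl stepA (I, bs)).1, p.1 ≤ p.2) := by
  induction zs generalizing I bs with
  | nil => exact ⟨rfl, rfl, fun h => h⟩
  | cons z zs ih =>
    simp only [List.foldl_cons]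
    have hf : ∀ k : Int, PySem.Int.floordiv (2 * k + 1) 2 = k := by
      intro k
      rw [PySem.Int.floordiv_eq_ediv_of_pos (by omega)]
      omega
    have hkey : 2 * md z.1.1 z.1.2 z.2.1 z.2.2 + 1 - 2 * |z.1.1 - 2000000|
        = 2 * (|z.1.1 - z.2.1| + |z.1.2 - z.2.2| - |z.1.1 - 2000000|) + 1 := by
      simp only [md]; ring
    have hA : stepA (I, bs) z =
        ((if (|z.1.1 - z.2.1| + |z.1.2 - z.2.2| - |z.1.1 - 2000000|) ≥ 0 then
            I ++ [(z.1.2 - (|z.1.1 - z.2.1| + |z.1.2 - z.2.2| - |z.1.1 - 2000000|),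
                   z.1.2 + (|z.1.1 - z.2.1| + |z.1.2 - z.2.2| - |z.1.1 - 2000000|))]
          else I),
         (if z.2.1 = 2000000 then PySem.Set.add bs z.2.2 else bs)) := by
      simp only [stepA, hkey, hf]
      congr 1
      by_cases h : (0:Int) ≤ |z.1.1 - z.2.1| + |z.1.2 - z.2.2| - |z.1.1 - 2000000|
      · rw [if_pos (by omega), if_pos (by omega)]
      · rw [if_neg (by omega), if_neg (by omega)]
    have hB : stepB (eventsOf I, bs) z =
        ((if (|z.1.1 - z.2.1| + |z.1.2 - z.2.2| - |z.1.1 - 2000000|) ≥ 0 then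
            eventsOf I ++ [(z.1.2 - (|z.1.1 - z.2.1| + |z.1.2 - z.2.2| - |z.1.1 - 2000000|), 1),
                           (z.1.2 + (|z.1.1 - z.2.1| + |z.1.2 - z.2.2| - |z.1.1 - 2000000|) + 1, -1)]
          else eventsOf I),
         (if z.2.1 = 2000000 then PySem.Set.add bs z.2.2 else bs)) := rfl
    rw [hA, hB]
    by_cases hw : (|z.1.1 - z.2.1| + |z.1.2 - z.2.2| - |z.1.1 - 2000000|) ≥ 0
    · rw [if_pos hw, if_pos hw]
      have hev : eventsOf (I ++ [(z.1.2 - (|z.1.1 - z.2.1| + |z.1.2 - z.2.2| - |z.1.1 - 2000000|),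
            z.1.2 + (|z.1.1 - z.2.1| + |z.1.2 - z.2.2| - |z.1.1 - 2000000|))])
          = eventsOf I ++ [(z.1.2 - (|z.1.1 - z.2.1| + |z.1.2 - z.2.2| - |z.1.1 - 2000000|), 1),
              (z.1.2 + (|z.1.1 - z.2.1| + |z.1.2 - z.2.2| - |z.1.1 - 2000000|) + 1, -1)] := by
        simp [eventsOf, evOf]
      rw [← hev]
      obtain ⟨c1, c2, c3⟩ := ih (I ++ [(z.1.2 - (|z.1.1 - z.2.1| + |z.1.2 - z.2.2| - |z.1.1 - 2000000|),
            z.1.2 + (|z.1.1 - z.2.1| + |z.1.2 - z.2.2| - |z.1.1 - 2000000|))])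
          (if z.2.1 = 2000000 then PySem.Set.add bs z.2.2 else bs)
      refine ⟨c1, c2, fun h => c3 ?_⟩
      intro p hp
      rcases List.mem_append.mp hp with hp' | hp'
      · exact h p hp'
      · rcases List.mem_singleton.mp hp' with rfl
        simp only
        omega
    · rw [if_neg hw, if_neg hw]
      exact ih I (if z.2.1 = 2000000 then PySem.Set.add bs z.2.2 else bs)

-- ===== VERDICT (by name: the statement is the Claim_ definition above) =====
theorem part1_spec : Claim_equal_part1 := by
  intro sensors beacons _
  unfold Spec_part1
  simp only [part1, part1_alt, get_cover]
  obtain ⟨c1, c2, c3⟩ := steps_couple (sensors.zip beacons) [] PySem.Set.empty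
  have hwf : ∀ p ∈ ((sensors.zip beacons).foldl stepA ([], PySem.Set.empty)).1, p.1 ≤ p.2 :=
    c3 (by simp)
  have hIB : ((sensors.zip beacons).foldl stepB ([], PySem.Set.empty)).1
      = eventsOf ((sensors.zip beacons).foldl stepA ([], PySem.Set.empty)).1 := c1
  have hBS : ((sensors.zip beacons).foldl stepB ([], PySem.Set.empty)).2
      = ((sensors.zip beacons).foldl stepA ([], PySem.Set.empty)).2 := c2
  rw [hIB, hBS]
  congr 1
  -- covered-count part
  set I := ((sensors.zip beacons).foldl stepA ([], PySem.Set.empty)).1 with hI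
  have hmerge := rel_fold (PySem.List.sorted2 I Prod.fst Prod.snd) [] (0, none) ⟨rfl, rfl⟩
  obtain ⟨hm1, _⟩ := hmerge
  have hLHS : ((PySem.List.sorted2 I Prod.fst Prod.snd).foldl mergeStep []).foldl
      (fun res p => res + (p.2 - p.1 + 1)) 0
      = ((PySem.List.sorted2 I Prod.fst Prod.snd).foldl clipStep (0, none)).1 := by
    rw [hm1]; rfl
  rw [hLHS, sorted2_eq_sortE, sorted2_eq_sortE]
  have hSp : (sortE I).Pairwise (fun a b => (toLex a : Lex (Int × Int)) ≤ toLex b) :=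
    sortE_pairwise I
  have hSlr : ∀ q ∈ sortE I, q.1 ≤ q.2 := fun q hq =>
    hwf q ((sortE_perm I).mem_iff.mp hq)
  have hcore := core (sortE I) hSp hSlr
  have hperm : (eventsOf (sortE I)).Perm (eventsOf I) :=
    List.Perm.flatMap (sortE_perm I) (fun a _ => List.Perm.refl _)
  have hsortEq : sortE (eventsOf I) = sortE (eventsOf (sortE I)) :=
    PySem.List.sorted_eq_sorted_of_perm _ _ _ toLex.injective hperm.symm
  rw [hsortEq, hcore]
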